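-- pv_equiv track=rewrite | github.com/astrid-ljy/AIAgentRepo | config/agent_contracts.py | is_type_compatible
-- ===== SOURCE A (Python) =====
-- TYPE_COMPATIBILITY = {
--     "INTEGER": {"INT2", "INT4", "INT8", "BIGINT", "SMALLINT", "INTEGER", "TINYINT"},
--     "TEXT": {"VARCHAR", "STRING", "TEXT", "CHAR"},
--     "DOUBLE": {"DECIMAL", "NUMERIC", "FLOAT", "DOUBLE", "REAL"},
--     "BOOLEAN": {"BOOLEAN", "BOOL"},
--     "DATE": {"DATE"},
--     "TIMESTAMP": {"TIMESTAMP", "DATETIME", "TIMESTAMPTZ"},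
--     "BLOB": {"BLOB", "BYTEA", "BINARY"}
-- }
--
-- def is_type_compatible(expected: str, actual: str) -> bool:
--     """
--     Check if actual type is compatible with expected type
--
--     Args:
--         expected: Expected type (e.g., "INTEGER")
--         actual: Actual type from database (e.g., "BIGINT")
--
--     Returns:
--         True if types are compatible, False otherwise
--     """
--     e, a = expected.upper(), actual.upper()
--
--     # Exact match
--     if a == e:
--         return True
--
--     # Check compatibility sets
--     for base_type, compatible_types in TYPE_COMPATIBILITY.items():
--         if e in compatible_types and a in compatible_types:
--             return True
--
--     return False
-- ===== SOURCE B (Python) =====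
-- # B: the category sets are hand-inverted into one flat type -> category table,
-- # so the function is two lookups and an equality test instead of a scan over sets.
-- TYPE_TO_CATEGORY = {
--     "INT2": "INTEGER", "INT4": "INTEGER", "INT8": "INTEGER", "BIGINT": "INTEGER",
--     "SMALLINT": "INTEGER", "INTEGER": "INTEGER", "TINYINT": "INTEGER",
--     "VARCHAR": "TEXT", "STRING": "TEXT", "TEXT": "TEXT", "CHAR": "TEXT",
--     "DECIMAL": "DOUBLE", "NUMERIC": "DOUBLE", "FLOAT": "DOUBLE",
--     "DOUBLE": "DOUBLE", "REAL": "DOUBLE",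
--     "BOOLEAN": "BOOLEAN", "BOOL": "BOOLEAN",
--     "DATE": "DATE",
--     "TIMESTAMP": "TIMESTAMP", "DATETIME": "TIMESTAMP", "TIMESTAMPTZ": "TIMESTAMP",
--     "BLOB": "BLOB", "BYTEA": "BLOB", "BINARY": "BLOB",
-- }
--
-- def is_type_compatible(expected: str, actual: str) -> bool:
--     e, a = expected.upper(), actual.upper()
--     if e == a:
--         return True
--     ce = TYPE_TO_CATEGORY.get(e)
--     return ce is not None and TYPE_TO_CATEGORY.get(a) == ce
-- ===== Notes on version B (the rewrite author's own statement) =====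
-- stated objective: simpler
-- what changed: Replaces the per-call scan over all category sets by a single flat type->category table, so the function is two table lookups and an equality test instead of a loop over seven membership pairs.
import Mathlib
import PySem

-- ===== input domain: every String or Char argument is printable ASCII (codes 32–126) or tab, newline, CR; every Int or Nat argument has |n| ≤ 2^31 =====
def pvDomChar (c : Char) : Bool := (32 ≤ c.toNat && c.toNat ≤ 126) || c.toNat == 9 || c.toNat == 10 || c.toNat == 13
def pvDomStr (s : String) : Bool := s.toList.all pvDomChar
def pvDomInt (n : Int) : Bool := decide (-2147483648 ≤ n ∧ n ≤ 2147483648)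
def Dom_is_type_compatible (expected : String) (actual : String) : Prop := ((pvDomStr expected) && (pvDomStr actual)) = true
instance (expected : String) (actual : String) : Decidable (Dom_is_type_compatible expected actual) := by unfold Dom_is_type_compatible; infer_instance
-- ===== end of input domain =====

-- B replaces A's per-call scan over the seven category sets by one flat type->category table and two lookups; objective: simpler.

-- ===== PORT A =====
def TYPE_COMPATIBILITY : PySem.Dict String (PySem.Set String) := PySem.Dict.ofList
  [ ("INTEGER", PySem.Set.ofList ["INT2", "INT4", "INT8", "BIGINT", "SMALLINT", "INTEGER", "TINYINT"]),
    ("TEXT", PySem.Set.ofList ["VARCHAR", "STRING", "TEXT", "CHAR"]),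
    ("DOUBLE", PySem.Set.ofList ["DECIMAL", "NUMERIC", "FLOAT", "DOUBLE", "REAL"]),
    ("BOOLEAN", PySem.Set.ofList ["BOOLEAN", "BOOL"]),
    ("DATE", PySem.Set.ofList ["DATE"]),
    ("TIMESTAMP", PySem.Set.ofList ["TIMESTAMP", "DATETIME", "TIMESTAMPTZ"]),
    ("BLOB", PySem.Set.ofList ["BLOB", "BYTEA", "BINARY"]) ]

def is_type_compatible (expected : String) (actual : String) : Bool :=
  let e := PySem.Str.upper expected
  let a := PySem.Str.upper actual
  if a == e then true
  else
    -- the for-loop with early 'return True' is List.any over the dict items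
    TYPE_COMPATIBILITY.items.any (fun p => PySem.Set.contains p.2 e && PySem.Set.contains p.2 a)

-- ===== PORT B =====
def TYPE_TO_CATEGORY : PySem.Dict String String := PySem.Dict.ofList
  [ ("INT2", "INTEGER"), ("INT4", "INTEGER"), ("INT8", "INTEGER"), ("BIGINT", "INTEGER"),
    ("SMALLINT", "INTEGER"), ("INTEGER", "INTEGER"), ("TINYINT", "INTEGER"),
    ("VARCHAR", "TEXT"), ("STRING", "TEXT"), ("TEXT", "TEXT"), ("CHAR", "TEXT"),
    ("DECIMAL", "DOUBLE"), ("NUMERIC", "DOUBLE"), ("FLOAT", "DOUBLE"),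
    ("DOUBLE", "DOUBLE"), ("REAL", "DOUBLE"),
    ("BOOLEAN", "BOOLEAN"), ("BOOL", "BOOLEAN"),
    ("DATE", "DATE"),
    ("TIMESTAMP", "TIMESTAMP"), ("DATETIME", "TIMESTAMP"), ("TIMESTAMPTZ", "TIMESTAMP"),
    ("BLOB", "BLOB"), ("BYTEA", "BLOB"), ("BINARY", "BLOB") ]

def is_type_compatible_alt (expected : String) (actual : String) : Bool :=
  let e := PySem.Str.upper expected
  let a := PySem.Str.upper actual
  if e == a then true
  else
    -- ce = TYPE_TO_CATEGORY.get(e); return ce is not None and TYPE_TO_CATEGORY.get(a) == ce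
    match TYPE_TO_CATEGORY.get? e with
    | none => false
    | some ce => TYPE_TO_CATEGORY.get? a == some ce

-- ===== PRECONDITION & SPEC =====
def Spec_is_type_compatible (expected : String) (actual : String) (out : Bool) : Prop := out = is_type_compatible_alt expected actual
instance (expected : String) (actual : String) (out : Bool) : Decidable (Spec_is_type_compatible expected actual out) := by unfold Spec_is_type_compatible; infer_instance

-- ===== CLAIM (what is proved, stated in full; the proofs are below) =====
def Claim_equal_is_type_compatible : Prop := ∀ (expected : String) (actual : String), Dom_is_type_compatible expected actual → Spec_is_type_compatible expected actual (is_type_compatible expected actual)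

-- ===== LEMMAS AND PROOFS =====

-- all 25 type names, used only for case analysis in the proofs
def pvAllTypes : List String :=
  ["INT2", "INT4", "INT8", "BIGINT", "SMALLINT", "INTEGER", "TINYINT",
   "VARCHAR", "STRING", "TEXT", "CHAR",
   "DECIMAL", "NUMERIC", "FLOAT", "DOUBLE", "REAL",
   "BOOLEAN", "BOOL", "DATE",
   "TIMESTAMP", "DATETIME", "TIMESTAMPTZ",
   "BLOB", "BYTEA", "BINARY"]

lemma keys_TTC : TYPE_TO_CATEGORY.keys = pvAllTypes := by decide

lemma get?_TTC_none {x : String} (hx : x ∉ pvAllTypes) : TYPE_TO_CATEGORY.get? x = none := by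
  rw [PySem.Dict.get?_eq_none_iff_not_mem_keys, keys_TTC]; exact hx

lemma items_TC : TYPE_COMPATIBILITY.items =
  [ ("INTEGER", ["INT2", "INT4", "INT8", "BIGINT", "SMALLINT", "INTEGER", "TINYINT"]),
    ("TEXT", ["VARCHAR", "STRING", "TEXT", "CHAR"]),
    ("DOUBLE", ["DECIMAL", "NUMERIC", "FLOAT", "DOUBLE", "REAL"]),
    ("BOOLEAN", ["BOOLEAN", "BOOL"]),
    ("DATE", ["DATE"]),
    ("TIMESTAMP", ["TIMESTAMP", "DATETIME", "TIMESTAMPTZ"]),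
    ("BLOB", ["BLOB", "BYTEA", "BINARY"]) ] := by decide

lemma core_eq (e a : String) :
    (if a == e then true
     else TYPE_COMPATIBILITY.items.any (fun p => PySem.Set.contains p.2 e && PySem.Set.contains p.2 a))
    = (if e == a then true
       else
         match TYPE_TO_CATEGORY.get? e with
         | none => false
         | some ce => TYPE_TO_CATEGORY.get? a == some ce) := by
  by_cases hea : a = e
  · subst hea; simp
  · have h1 : (a == e) = false := by simp [hea]
    have h2 : (e == a) = false := by simp [Ne.symm hea]
    rw [h1, h2]
    simp only [if_false, Bool.false_eq_true]
    by_cases he : e ∈ pvAllTypes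
    · by_cases ha : a ∈ pvAllTypes
      · simp only [pvAllTypes, List.mem_cons, List.not_mem_nil, or_false] at he ha
        rcases he with rfl|rfl|rfl|rfl|rfl|rfl|rfl|rfl|rfl|rfl|rfl|rfl|rfl|rfl|rfl|rfl|rfl|rfl|rfl|rfl|rfl|rfl|rfl|rfl|rfl <;>
          rcases ha with rfl|rfl|rfl|rfl|rfl|rfl|rfl|rfl|rfl|rfl|rfl|rfl|rfl|rfl|rfl|rfl|rfl|rfl|rfl|rfl|rfl|rfl|rfl|rfl|rfl <;>
          decide
      · have hg : TYPE_TO_CATEGORY.get? a = none := get?_TTC_none ha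
        simp only [pvAllTypes, List.mem_cons, List.not_mem_nil, or_false, not_or] at ha
        rw [items_TC]
        cases hge : TYPE_TO_CATEGORY.get? e <;>
          simp [PySem.Set.contains, List.any, ha, hg]
    · have hg : TYPE_TO_CATEGORY.get? e = none := get?_TTC_none he
      simp only [pvAllTypes, List.mem_cons, List.not_mem_nil, or_false, not_or] at he
      rw [hg, items_TC]
      simp [PySem.Set.contains, List.any, he]

-- ===== VERDICT (by name: the statement is the Claim_ definition above) =====
theorem is_type_compatible_spec : Claim_equal_is_type_compatible := by
  intro e a _
  unfold Spec_is_type_compatible is_type_compatible is_type_compatible_alt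
  exact core_eq (PySem.Str.upper e) (PySem.Str.upper a)
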